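-- pv_equiv track=rewrite | github.com/mbsullivan/mbsullivan.github.io | source2/research_bib/pybib.py | strip_latex
-- ===== SOURCE A (Python) =====
-- def strip_latex(record):
--     """ Strip out unrendedered characters from the record
--     :param record: a record
--     :returns: -- customized record
--     """
--     def strip_key(record, key):
--         """ If the key exists, strip it. """
--         strip_maps = [("{", ""), ("}", ""),
--                       ("\&", "&"), ("\%", "%")]
--         if key in record:
--             for strip_map in strip_maps:
--                 record[key] = record[key].replace(*strip_map)
--
--     keys_to_strip = ["title", "abstract", "booktitle", "journal"]
--     for key in keys_to_strip:
--         strip_key(record, key)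
--
--     return record
-- ===== SOURCE B (Python) =====
-- def strip_latex(record):
--     """Same cleanup, done per-field in one composed pass (brace filter + two
--     backslash-unescape scans) instead of four str.replace calls."""
--     def unescape(s, ch):
--         out = []
--         i = 0
--         while i < len(s):
--             if s[i] == '\\' and i + 1 < len(s) and s[i + 1] == ch:
--                 out.append(ch)
--                 i += 2
--             else:
--                 out.append(s[i])
--                 i += 1
--         return ''.join(out)
--
--     for key in ("title", "abstract", "booktitle", "journal"):
--         if key in record:
--             cleaned = ''.join(c for c in record[key] if c not in '{}')
--             record[key] = unescape(unescape(cleaned, '&'), '%')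
--     return record
-- ===== Notes on version B (the rewrite author's own statement) =====
-- stated objective: alternative
-- what changed: Replaces the strip_key helper's loop over four (old,new) str.replace pairs with a per-field composed pass: a character filter dropping braces followed by two explicit left-to-right backslash-unescape scans.
import Mathlib
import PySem

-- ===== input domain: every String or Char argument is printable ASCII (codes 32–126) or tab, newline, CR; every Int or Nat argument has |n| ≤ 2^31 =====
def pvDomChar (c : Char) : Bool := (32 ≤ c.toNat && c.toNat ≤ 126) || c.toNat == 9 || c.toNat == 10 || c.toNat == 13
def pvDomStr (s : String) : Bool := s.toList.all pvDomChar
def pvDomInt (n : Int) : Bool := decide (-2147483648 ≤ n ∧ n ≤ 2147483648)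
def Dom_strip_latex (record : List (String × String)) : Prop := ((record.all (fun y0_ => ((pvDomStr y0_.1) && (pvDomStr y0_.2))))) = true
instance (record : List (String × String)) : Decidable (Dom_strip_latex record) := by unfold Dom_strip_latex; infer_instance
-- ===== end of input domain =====

-- B replaces the four sequential str.replace passes with a brace filter plus two explicit
-- backslash-unescape scans per field (objective: alternative decomposition, same cost).
-- Both Pythons mutate the record in place; the equivalence proved here is about the returned record.

-- ===== PORT A =====
def pvStripMaps : List (String × String) := [("{", ""), ("}", ""), ("\\&", "&"), ("\\%", "%")]

-- strip_key: if the key exists, apply each (old, new) replacement in order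
def pvStripKey (d : PySem.Dict String String) (key : String) : PySem.Dict String String :=
  if d.contains key then
    pvStripMaps.foldl (fun d m => d.insert key (PySem.Str.replace (d.getD key "") m.1 m.2)) d
  else d

def strip_latex (record : List (String × String)) : List (String × String) :=
  ((["title", "abstract", "booktitle", "journal"].foldl pvStripKey (PySem.Dict.mk record))).items

-- ===== PORT B =====
-- unescape(s, ch): one left-to-right scan deleting a backslash immediately before ch
def pvUnescape (ch : Char) : List Char → List Char
  | [] => []
  | [c] => [c]
  | x :: y :: t =>
    if x = '\\' ∧ y = ch then ch :: pvUnescape ch t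
    else x :: pvUnescape ch (y :: t)
termination_by l => l.length

def pvCleanB (s : String) : String :=
  String.ofList (pvUnescape '%' (pvUnescape '&' (s.toList.filter (fun c => !(c == '{' || c == '}')))))

def strip_latex_alt (record : List (String × String)) : List (String × String) :=
  ((["title", "abstract", "booktitle", "journal"].foldl
      (fun d key => if d.contains key then d.insert key (pvCleanB (d.getD key "")) else d)
      (PySem.Dict.mk record))).items

-- ===== PRECONDITION & SPEC =====
def Spec_strip_latex (record : List (String × String)) (out : List (String × String)) : Prop := out = strip_latex_alt record
instance (record : List (String × String)) (out : List (String × String)) : Decidable (Spec_strip_latex record out) := by unfold Spec_strip_latex; infer_instance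

-- ===== CLAIM (what is proved, stated in full; the proofs are below) =====
def Claim_equal_strip_latex : Prop := ∀ (record : List (String × String)), Dom_strip_latex record → Spec_strip_latex record (strip_latex record)

-- ===== LEMMAS AND PROOFS =====

-- replace with a one-char pattern and empty replacement is a filter
theorem pv_go_single (c : Char) : ∀ (fuel : Nat) (l acc : List Char), l.length ≤ fuel →
    PySem.Chars.replace.go [c] [] fuel l acc = acc.reverse ++ l.filter (fun x => x ≠ c) := by
  intro fuel
  induction fuel with
  | zero =>
    intro l acc h
    have : l = [] := List.eq_nil_of_length_eq_zero (Nat.le_zero.mp h)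
    subst this; simp [PySem.Chars.replace.go]
  | succ n ih =>
    intro l acc h
    cases l with
    | nil => simp [PySem.Chars.replace.go]
    | cons x t =>
      simp only [PySem.Chars.replace.go]
      by_cases hx : x = c
      · subst hx
        simp only [List.isPrefixOf, BEq.rfl, Bool.and_self, if_pos,
          List.length_singleton, List.drop_one, List.tail_cons, List.reverse_nil, List.nil_append]
        simp only [List.length_cons, Nat.succ_le_succ_iff] at h
        rw [ih t _ h]
        simp
      · have : List.isPrefixOf [c] (x :: t) = false := by
          simp [List.isPrefixOf]; exact fun hh => absurd hh.symm hx
        rw [this]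
        simp only [List.length_cons, Nat.succ_le_succ_iff] at h
        rw [if_neg (by simp_all), ih t _ h]
        simp [hx]

-- replace with the pattern "\c" and replacement "c" is the one-pass unescape scan
theorem pv_go_unesc (c : Char) : ∀ (fuel : Nat) (l acc : List Char), l.length ≤ fuel →
    PySem.Chars.replace.go ['\\', c] [c] fuel l acc = acc.reverse ++ pvUnescape c l := by
  intro fuel
  induction fuel with
  | zero =>
    intro l acc h
    have : l = [] := List.eq_nil_of_length_eq_zero (Nat.le_zero.mp h)
    subst this; simp [PySem.Chars.replace.go, pvUnescape]
  | succ n ih =>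
    intro l acc h
    match l with
    | [] => simp [PySem.Chars.replace.go, pvUnescape]
    | [x] =>
      simp only [PySem.Chars.replace.go, pvUnescape]
      rw [show List.isPrefixOf ['\\', c] [x] = false by simp [List.isPrefixOf]]
      simp only [Bool.false_eq_true, if_false]
      cases n <;> simp [PySem.Chars.replace.go]
    | x :: y :: t =>
      simp only [PySem.Chars.replace.go]
      by_cases hc : x = '\\' ∧ y = c
      · obtain ⟨hx, hy⟩ := hc; subst hx; subst hy
        rw [show List.isPrefixOf ['\\', y] ('\\' :: y :: t) = true by simp [List.isPrefixOf]]
        simp only [if_pos]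
        simp only [List.length_cons, Nat.succ_le_succ_iff] at h
        rw [show List.drop (List.length ['\\', y]) ('\\' :: y :: t) = t by simp]
        rw [ih t _ (Nat.le_of_succ_le h)]
        simp [pvUnescape]
      · have hpf : List.isPrefixOf ['\\', c] (x :: y :: t) = false := by
          by_cases h1 : x = '\\'
          · have hy : y ≠ c := fun hy => hc ⟨h1, hy⟩
            subst h1; simp [List.isPrefixOf, Ne.symm hy]
          · simp [List.isPrefixOf, Ne.symm h1]
        rw [hpf]
        simp only [Bool.false_eq_true, if_false]
        simp only [List.length_cons, Nat.succ_le_succ_iff] at h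
        rw [ih (y :: t) _ (by simpa using h)]
        simp [pvUnescape, hc]

theorem pv_replace_single (c : Char) (l : List Char) :
    PySem.Chars.replace l [c] [] = l.filter (fun x => x ≠ c) := by
  rw [PySem.Chars.replace]
  simp only [List.isEmpty_cons, Bool.false_eq_true, if_false]
  exact pv_go_single c l.length l [] (le_refl _)

theorem pv_replace_unesc (c : Char) (l : List Char) :
    PySem.Chars.replace l ['\\', c] [c] = pvUnescape c l := by
  rw [PySem.Chars.replace]
  simp only [List.isEmpty_cons, Bool.false_eq_true, if_false]
  exact pv_go_unesc c l.length l [] (le_refl _)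

-- A's four sequential replaces equal B's composed pass, per string
theorem pv_chain_eq (v : String) :
    PySem.Str.replace (PySem.Str.replace (PySem.Str.replace (PySem.Str.replace v "{" "") "}" "") "\\&" "&") "\\%" "%"
      = pvCleanB v := by
  simp only [PySem.Str.replace, pvCleanB, String.toList_ofList]
  rw [show ("{" : String).toList = ['{'] from rfl, show ("}" : String).toList = ['}'] from rfl,
      show ("" : String).toList = [] from rfl,
      show ("\\&" : String).toList = ['\\', '&'] from rfl, show ("&" : String).toList = ['&'] from rfl,
      show ("\\%" : String).toList = ['\\', '%'] from rfl, show ("%" : String).toList = ['%'] from rfl]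
  rw [pv_replace_single, pv_replace_single, pv_replace_unesc, pv_replace_unesc]
  congr 1
  rw [List.filter_filter]
  rw [show (fun a : Char => decide (a ≠ '}') && decide (a ≠ '{')) = (fun c : Char => !(c == '{' || c == '}')) by
    funext x; by_cases h1 : x = '{' <;> by_cases h2 : x = '}' <;> simp [h1, h2]]

-- the per-key step functions agree
theorem pv_step_eq (d : PySem.Dict String String) (key : String) :
    pvStripKey d key = (if d.contains key then d.insert key (pvCleanB (d.getD key "")) else d) := by
  unfold pvStripKey
  split
  · simp only [pvStripMaps, List.foldl, PySem.Dict.getD_insert_self, PySem.Dict.insert_insert_self]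
    rw [pv_chain_eq]
  · rfl

-- ===== VERDICT (by name: the statement is the Claim_ definition above) =====
theorem strip_latex_spec : Claim_equal_strip_latex := by
  intro record _
  unfold Spec_strip_latex strip_latex strip_latex_alt
  rw [show pvStripKey
        = (fun (d : PySem.Dict String String) (key : String) =>
            if d.contains key then d.insert key (pvCleanB (d.getD key "")) else d)
      from funext fun d => funext fun k => pv_step_eq d k]
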